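-- pv_equiv track=rewrite | github.com/Jeonghoon2/Coding-once-a-day | 프로그래머스/Lv.1/명예의 전당.py | solution
-- ===== SOURCE A (Python) =====
-- def solution(k, score):
--
--     answer = []
--     print_score = []
--     for i in range(len(score)):
--
--         print_score.append(score[i])
--
--         if print_score[0] > score[i]:
--             del print_score[-1]
--
--         if len(print_score) == k+1:
--             del print_score[0]
--
--         print_score.sort(reverse=False)
--         answer.append(print_score[0])
--
--     return answer
-- ===== SOURCE B (Python) =====
-- def solution(k, score):
--     answer = []
--     window = []  # current hall of fame, kept sorted ascending at all times
--     for s in score: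
--         if not window or window[0] <= s:
--             # binary search for the insertion point (rightmost position)
--             lo, hi = 0, len(window)
--             while lo < hi:
--                 mid = (lo + hi) // 2
--                 if window[mid] <= s:
--                     lo = mid + 1
--                 else:
--                     hi = mid
--             window.insert(lo, s)
--             if len(window) == k + 1:
--                 del window[0]
--         answer.append(window[0])
--     return answer
-- ===== Notes on version B (the rewrite author's own statement) =====
-- stated objective: faster
-- what changed: A re-sorts the whole hall-of-fame list after every score; B keeps the list sorted invariantly and places each admitted score with a hand-written binary search plus one positional insert, deleting the head when the cap is exceeded, so the per-step sort disappears.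
import Mathlib
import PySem

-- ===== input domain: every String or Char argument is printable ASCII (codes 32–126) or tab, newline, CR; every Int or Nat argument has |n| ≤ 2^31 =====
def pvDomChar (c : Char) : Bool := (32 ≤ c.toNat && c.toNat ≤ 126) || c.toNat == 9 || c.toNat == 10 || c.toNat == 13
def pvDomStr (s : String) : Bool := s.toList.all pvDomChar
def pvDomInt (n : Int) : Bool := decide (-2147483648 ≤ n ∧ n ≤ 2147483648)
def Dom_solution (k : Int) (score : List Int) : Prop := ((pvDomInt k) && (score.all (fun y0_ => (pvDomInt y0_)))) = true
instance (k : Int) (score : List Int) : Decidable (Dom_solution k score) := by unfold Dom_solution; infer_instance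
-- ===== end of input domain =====

-- B replaces A's per-step full sort by maintaining the window sorted and doing one ordered insert (measured faster).

-- ===== PORT A =====
-- one loop iteration of A: append, conditional del[-1], conditional del[0], sort, record min
def stepA (k : Int) (st : List Int × List Int) (s : Int) : List Int × List Int :=
  let ps1 := st.2 ++ [s]
  let ps2 := if PySem.List.pyGetD ps1 0 0 > s then ps1.dropLast else ps1
  let ps3 := if (ps2.length : Int) = k + 1 then ps2.tail else ps2
  let ps4 := PySem.List.sorted ps3 (fun x => x) false
  (st.1 ++ [PySem.List.pyGetD ps4 0 0], ps4)

def solution (k : Int) (score : List Int) : List Int :=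
  ((PySem.List.pyRange 0 (score.length : Int) 1).foldl
    (fun st i => stepA k st (PySem.List.pyGetD score i 0)) ([], [])).1

-- ===== PORT B =====
-- the hand-written binary-search loop of B: while lo < hi: mid=(lo+hi)//2; ...
def bsLoopFuel (w : List Int) (s : Int) : Nat → Int → Int → Int
  | 0, lo, _ => lo
  | fuel + 1, lo, hi =>
    if lo < hi then
      let mid := PySem.Int.floordiv (lo + hi) 2
      if PySem.List.pyGetD w mid 0 ≤ s then bsLoopFuel w s fuel (mid + 1) hi
      else bsLoopFuel w s fuel lo mid
    else lo

-- the while-loop runs at most (hi - lo) times; the fuel only bounds that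
def bsLoop (w : List Int) (s : Int) (lo hi : Int) : Int :=
  bsLoopFuel w s (hi - lo).toNat lo hi

-- insert branch of B: binary search, window.insert(lo, s), del window[0] on overflow
def bInsert (k : Int) (w : List Int) (s : Int) : List Int :=
  let lo := bsLoop w s 0 (w.length : Int)
  let t := PySem.List.insert w lo s
  if (t.length : Int) = k + 1 then t.tail else t

-- one loop iteration of B: guarded insert, record min
def stepB (k : Int) (st : List Int × List Int) (s : Int) : List Int × List Int :=
  let w := st.2
  let w' := match w with
    | [] => bInsert k w s
    | x :: _ => if x ≤ s then bInsert k w s else w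
  (st.1 ++ [PySem.List.pyGetD w' 0 0], w')

def solution_alt (k : Int) (score : List Int) : List Int :=
  (score.foldl (stepB k) ([], [])).1

-- ===== PRECONDITION & SPEC =====
-- Pre_ excludes exactly k = 0 with a nonempty score, where A (and B) raise IndexError reading the emptied list.
def Pre_solution (k : Int) (score : List Int) : Prop := k ≠ 0 ∨ score = []
instance (k : Int) (score : List Int) : Decidable (Pre_solution k score) := by unfold Pre_solution; infer_instance
def pvWitness_solution : Int × List Int := (3, [10, 100, 20, 150, 1, 100, 200])

def Spec_solution (k : Int) (score : List Int) (out : List Int) : Prop := out = solution_alt k score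
instance (k : Int) (score : List Int) (out : List Int) : Decidable (Spec_solution k score out) := by unfold Spec_solution; infer_instance

-- ===== CLAIM (what is proved, stated in full; the proofs are below) =====
def Claim_equal_solution : Prop := ∀ (k : Int) (score : List Int), Dom_solution k score → Pre_solution k score → Spec_solution k score (solution k score)

-- ===== LEMMAS AND PROOFS =====

-- proof-side reference implementation: ordered insert into a sorted list
def insertSorted (s : Int) : List Int → List Int
  | [] => [s]
  | x :: xs => if x ≤ s then x :: insertSorted s xs else s :: x :: xs


-- state invariant maintained by both loops
def HofInv (k : Int) (w : List Int) : Prop :=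
  w.Pairwise (· ≤ ·) ∧ (1 ≤ k → (w.length : Int) ≤ k) ∧ (k = 0 → w = [])

theorem insertSorted_perm (s : Int) (w : List Int) : (insertSorted s w).Perm (w ++ [s]) := by
  induction w with
  | nil => simp [insertSorted]
  | cons x xs ih =>
    simp only [insertSorted]
    split
    · exact (ih.cons x)
    · exact List.Perm.symm (List.perm_append_singleton s (x :: xs))

theorem insertSorted_length (s : Int) (w : List Int) : (insertSorted s w).length = w.length + 1 := by
  simpa using (insertSorted_perm s w).length_eq

theorem insertSorted_pairwise (s : Int) (w : List Int) (h : w.Pairwise (· ≤ ·)) :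
    (insertSorted s w).Pairwise (· ≤ ·) := by
  induction w with
  | nil => simp [insertSorted]
  | cons x xs ih =>
    rcases List.pairwise_cons.mp h with ⟨hx, hxs⟩
    simp only [insertSorted]
    split
    · rename_i hle
      refine List.pairwise_cons.mpr ⟨?_, ih hxs⟩
      intro y hy
      rcases (insertSorted_perm s xs).mem_iff.mp hy with hy'
      rcases List.mem_append.mp hy' with h1 | h2
      · exact hx y h1
      · simp at h2; omega
    · rename_i hgt
      refine List.pairwise_cons.mpr ⟨?_, h⟩
      intro y hy
      rcases List.mem_cons.mp hy with rfl | hmem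
      · omega
      · exact le_trans (by omega) (hx y hmem)

-- sorting w ++ [s] (w already sorted) is exactly the one-pass ordered insert
theorem sorted_concat_eq_insertSorted (s : Int) (w : List Int) (h : w.Pairwise (· ≤ ·)) :
    PySem.List.sorted (w ++ [s]) (fun x => x) false = insertSorted s w :=
  PySem.List.sorted_id_eq_of_perm_of_pairwise (w ++ [s]) (insertSorted s w) (insertSorted_perm s w) (insertSorted_pairwise s w h)

-- the binary-search loop returns the takeWhile split point of a sorted window
theorem bsLoopFuel_eq (w : List Int) (s : Int) (T : Nat)
    (hF1 : ∀ i (hi : i < w.length), i < T → w[i] ≤ s)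
    (hF2 : ∀ i (hi : i < w.length), T ≤ i → s < w[i]) :
    ∀ (fuel : Nat) (lo hi : Int), (hi - lo).toNat ≤ fuel → 0 ≤ lo → lo ≤ (T : Int) →
      (T : Int) ≤ hi → hi ≤ (w.length : Int) → bsLoopFuel w s fuel lo hi = (T : Int) := by
  intro fuel
  induction fuel with
  | zero =>
    intro lo hi hn h0 hloT hThi hhilen
    simp only [bsLoopFuel]
    omega
  | succ fuel ih =>
    intro lo hi hn h0 hloT hThi hhilen
    by_cases h : lo < hi
    · have hmid := PySem.Int.floordiv_two_mid_bounds (le_of_lt h)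
      have hmidlt : PySem.Int.floordiv (lo + hi) 2 < hi :=
        (PySem.Int.floordiv_lt_iff_lt_mul (by omega)).mpr (by omega : lo + hi < hi * 2)
      have hmid0 : (0 : Int) ≤ PySem.Int.floordiv (lo + hi) 2 := le_trans h0 hmid.1
      have hmidlen : PySem.Int.floordiv (lo + hi) 2 < (w.length : Int) := lt_of_lt_of_le hmidlt hhilen
      have hget : PySem.List.pyGetD w (PySem.Int.floordiv (lo + hi) 2) 0
          = w[(PySem.Int.floordiv (lo + hi) 2).toNat]'(by omega) :=
        PySem.List.pyGetD_eq_getElem w 0 hmid0 hmidlen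
      simp only [bsLoopFuel, if_pos h]
      show (if PySem.List.pyGetD w (PySem.Int.floordiv (lo + hi) 2) 0 ≤ s then
              bsLoopFuel w s fuel (PySem.Int.floordiv (lo + hi) 2 + 1) hi
            else bsLoopFuel w s fuel lo (PySem.Int.floordiv (lo + hi) 2)) = (T : Int)
      by_cases hle : PySem.List.pyGetD w (PySem.Int.floordiv (lo + hi) 2) 0 ≤ s
      · rw [if_pos hle]
        have hmidT : PySem.Int.floordiv (lo + hi) 2 < (T : Int) := by
          by_contra hc
          have hlt := hF2 (PySem.Int.floordiv (lo + hi) 2).toNat (by omega) (by omega)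
          rw [hget] at hle
          exact absurd hle (not_le.mpr hlt)
        exact ih _ hi (by omega) (by omega) (by omega) hThi hhilen
      · rw [if_neg hle]
        have hmidT : (T : Int) ≤ PySem.Int.floordiv (lo + hi) 2 := by
          by_contra hc
          have hlt := hF1 (PySem.Int.floordiv (lo + hi) 2).toNat (by omega) (by omega)
          rw [hget] at hle
          exact absurd hlt hle
        exact ih lo _ (by omega) h0 hloT hmidT (by omega)
    · simp only [bsLoopFuel, if_neg h]
      omega

-- inserting at the takeWhile split point is the ordered insert
theorem insert_takeWhile (s : Int) (w : List Int) :
    PySem.List.insert w (((w.takeWhile (fun x => decide (x ≤ s))).length : Int)) s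
      = insertSorted s w := by
  induction w with
  | nil => simpa using PySem.List.insert_zero ([] : List Int) s
  | cons x xs ih =>
    by_cases hxs : x ≤ s
    · have hlen : (xs.takeWhile (fun x => decide (x ≤ s))).length ≤ xs.length :=
        (List.takeWhile_prefix _).length_le
      rw [show ((x :: xs).takeWhile (fun y => decide (y ≤ s)))
            = x :: xs.takeWhile (fun y => decide (y ≤ s)) by simp [hxs]]
      rw [List.length_cons,
        PySem.List.insert_natCast (x :: xs) ((xs.takeWhile (fun y => decide (y ≤ s))).length + 1) s
          (by simpa using Nat.succ_le_succ hlen),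
        List.take_succ_cons, List.drop_succ_cons, List.cons_append,
        ← PySem.List.insert_natCast xs ((xs.takeWhile (fun y => decide (y ≤ s))).length) s hlen,
        ih]
      simp [insertSorted, hxs]
    · rw [show ((x :: xs).takeWhile (fun y => decide (y ≤ s))) = [] by simp [hxs]]
      simp only [List.length_nil, Nat.cast_zero, PySem.List.insert_zero]
      simp [insertSorted, hxs]

-- B's insert branch equals the capped ordered insert, on a sorted window
theorem bInsert_eq (k s : Int) (w : List Int) (hsort : w.Pairwise (· ≤ ·)) :
    bInsert k w s = (if ((insertSorted s w).length : Int) = k + 1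
      then (insertSorted s w).tail else insertSorted s w) := by
  have hTle : (w.takeWhile (fun x => decide (x ≤ s))).length ≤ w.length :=
    (List.takeWhile_prefix _).length_le
  have hF1 : ∀ i (hi : i < w.length), i < (w.takeWhile (fun x => decide (x ≤ s))).length →
      w[i] ≤ s := by
    intro i hi hiT
    have hpre := List.takeWhile_prefix (l := w) (fun x => decide (x ≤ s))
    have hmem := List.mem_takeWhile_imp
      (List.getElem_mem (l := w.takeWhile (fun x => decide (x ≤ s))) (n := i) hiT)
    rw [hpre.getElem hiT] at hmem
    exact of_decide_eq_true hmem
  have hF2 : ∀ i (hi : i < w.length), (w.takeWhile (fun x => decide (x ≤ s))).length ≤ i →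
      s < w[i] := by
    intro i hi hTi
    have hTlt : (w.takeWhile (fun x => decide (x ≤ s))).length < w.length := lt_of_le_of_lt hTi hi
    have hsplit : w.takeWhile (fun x => decide (x ≤ s)) ++ w.dropWhile (fun x => decide (x ≤ s)) = w :=
      List.takeWhile_append_dropWhile
    have hdne : w.dropWhile (fun x => decide (x ≤ s)) ≠ [] := by
      intro hnil
      have := congrArg List.length hsplit
      rw [hnil] at this
      simp at this
      omega
    have hhead := List.head_dropWhile_not (fun x => decide (x ≤ s)) hdne
    have hWT : s < w[(w.takeWhile (fun x => decide (x ≤ s))).length]'hTlt := by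
      have h1 : w[(w.takeWhile (fun x => decide (x ≤ s))).length]'hTlt
          = (w.takeWhile (fun x => decide (x ≤ s)) ++ w.dropWhile (fun x => decide (x ≤ s)))[(w.takeWhile (fun x => decide (x ≤ s))).length]'(by rw [hsplit]; exact hTlt) :=
        List.getElem_of_eq hsplit.symm hTlt
      rw [h1, List.getElem_append_right (le_refl _)]
      have h0lt : 0 < (w.dropWhile (fun x => decide (x ≤ s))).length := by
        cases hd : w.dropWhile (fun x => decide (x ≤ s)) with
        | nil => exact absurd hd hdne
        | cons a as => simp
      have h2 : (w.dropWhile (fun x => decide (x ≤ s)))[(w.takeWhile (fun x => decide (x ≤ s))).length - (w.takeWhile (fun x => decide (x ≤ s))).length]'(by omega)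
          = (w.dropWhile (fun x => decide (x ≤ s))).head hdne := by
        simp [List.getElem_zero_eq_head]
      rw [h2]
      have := of_decide_eq_false hhead
      omega
    by_cases hTi' : (w.takeWhile (fun x => decide (x ≤ s))).length = i
    · subst hTi'; exact hWT
    · have hmono := List.pairwise_iff_getElem.mp hsort
        (w.takeWhile (fun x => decide (x ≤ s))).length i hTlt hi (by omega)
      exact lt_of_lt_of_le hWT hmono
  have hpos : bsLoop w s 0 (w.length : Int)
      = (((w.takeWhile (fun x => decide (x ≤ s))).length : Nat) : Int) := by
    unfold bsLoop
    exact bsLoopFuel_eq w s _ hF1 hF2 ((w.length : Int) - 0).toNat 0 (w.length : Int)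
      (le_refl _) (by omega) (by exact_mod_cast Int.natCast_nonneg _) (by exact_mod_cast hTle)
      (le_refl _)
  simp only [bInsert]
  rw [hpos, insert_takeWhile]

theorem step_eq (k : Int) (s : Int) (ans w : List Int) (hI : HofInv k w) :
    stepA k (ans, w) s = stepB k (ans, w) s := by
  obtain ⟨hsort, hlen, hk0⟩ := hI
  cases w with
  | nil =>
    have hs1 : PySem.List.sorted [s] (fun x => x) false = [s] :=
      PySem.List.sorted_eq_self_of_pairwise [s] (fun x => x) (by simp)
    have hins : insertSorted s ([] : List Int) = [s] := rfl
    have hb : bInsert k ([] : List Int) s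
        = (if (([s] : List Int).length : Int) = k + 1 then ([s] : List Int).tail else ([s] : List Int)) := by
      rw [bInsert_eq k s [] List.Pairwise.nil, hins]
    simp only [stepA, stepB, List.nil_append, PySem.List.pyGetD_zero_cons]
    rw [hb, if_neg (lt_irrefl s)]
    by_cases hc : ((([s] : List Int).length : Int) = k + 1)
    · rw [if_pos hc]; rfl
    · rw [if_neg hc, hs1]
  | cons x xs =>
    by_cases hxs : x ≤ s
    · -- insert case
      have h1 : ¬ (x > s) := not_lt.mpr hxs
      have hins : insertSorted s (x :: xs) = x :: insertSorted s xs := by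
        simp [insertSorted, hxs]
      have hlenEq : ((x :: (xs ++ [s])).length : Int) = ((insertSorted s (x :: xs)).length : Int) := by
        rw [insertSorted_length]; simp
      simp only [stepA, stepB, List.cons_append, PySem.List.pyGetD_zero_cons, if_neg h1,
        if_pos hxs]
      rw [bInsert_eq k s (x :: xs) hsort, hlenEq]
      by_cases hcap : ((insertSorted s (x :: xs)).length : Int) = k + 1
      · rw [if_pos hcap, if_pos hcap]
        have hxs_sorted : xs.Pairwise (· ≤ ·) := (List.pairwise_cons.mp hsort).2
        have : PySem.List.sorted ((x :: (xs ++ [s])).tail) (fun x => x) false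
            = (insertSorted s (x :: xs)).tail := by
          rw [List.tail_cons, hins, List.tail_cons, sorted_concat_eq_insertSorted s xs hxs_sorted]
        rw [this]
      · rw [if_neg hcap, if_neg hcap]
        have : PySem.List.sorted (x :: (xs ++ [s])) (fun x => x) false
            = insertSorted s (x :: xs) := by
          have := sorted_concat_eq_insertSorted s (x :: xs) hsort
          simpa using this
        rw [this]
    · -- skip case: A appends, deletes the last again, len ≠ k+1, sort is identity
      have h1 : x > s := not_le.mp hxs
      have hdrop : (x :: (xs ++ [s])).dropLast = x :: xs := by
        rw [← List.cons_append, List.dropLast_concat]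
      have hne : ¬ (((x :: xs).length : Int) = k + 1) := by
        by_cases hk1 : 1 ≤ k
        · have := hlen hk1; omega
        · by_cases h0 : k = 0
          · exact absurd (hk0 h0) (by simp)
          · simp only [List.length_cons]; push_cast; omega
      simp only [stepA, stepB, List.cons_append, PySem.List.pyGetD_zero_cons, if_pos h1,
        if_neg hxs]
      rw [hdrop, if_neg hne, PySem.List.sorted_eq_self_of_pairwise (x :: xs) (fun x => x) hsort,
        PySem.List.pyGetD_zero_cons]

theorem inv_stepB (k : Int) (s : Int) (ans w : List Int) (hI : HofInv k w) :
    HofInv k (stepB k (ans, w) s).2 := by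
  obtain ⟨hsort, hlen, hk0⟩ := hI
  have main : ∀ t : List Int, t = insertSorted s w →
      HofInv k (if (t.length : Int) = k + 1 then t.tail else t) := by
    intro t ht
    have htp : t.Pairwise (· ≤ ·) := ht ▸ insertSorted_pairwise s w hsort
    have htl : t.length = w.length + 1 := ht ▸ insertSorted_length s w
    split
    · rename_i heq
      refine ⟨List.Pairwise.tail htp, ?_, ?_⟩
      · intro h1
        have : (t.tail.length : Int) = (t.length : Int) - 1 := by
          cases t with
          | nil => simp at htl
          | cons a as => simp only [List.tail_cons, List.length_cons]; push_cast; omega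
        omega
      · intro h0
        subst h0
        have : t.length = 1 := by exact_mod_cast heq
        cases t with
        | nil => simp at this
        | cons a as => simp at this; simp [this]
    · rename_i hne
      refine ⟨htp, ?_, ?_⟩
      · intro h1
        have := hlen h1
        by_cases hc : (w.length : Int) = k
        · exfalso; apply hne; omega
        · omega
      · intro h0
        exfalso
        have := hk0 h0
        subst this
        apply hne
        simp [ht, insertSorted, h0]
  cases w with
  | nil =>
    have h2 : (stepB k (ans, ([] : List Int)) s).2 = bInsert k [] s := rfl
    rw [h2, bInsert_eq k s [] List.Pairwise.nil]; exact main _ rfl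
  | cons x xs =>
    by_cases hxs : x ≤ s
    · have h2 : (stepB k (ans, x :: xs) s).2 = bInsert k (x :: xs) s := by
        simp [stepB, hxs]
      rw [h2, bInsert_eq k s (x :: xs) hsort]; exact main _ rfl
    · have h2 : (stepB k (ans, x :: xs) s).2 = x :: xs := by
        simp [stepB, hxs]
      rw [h2]; exact ⟨hsort, hlen, hk0⟩

theorem foldl_eq (k : Int) (rest : List Int) : ∀ (ans w : List Int), HofInv k w →
    rest.foldl (stepA k) (ans, w) = rest.foldl (stepB k) (ans, w) := by
  induction rest with
  | nil => intro ans w _; rfl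
  | cons s rest ih =>
    intro ans w hI
    simp only [List.foldl_cons]
    rw [step_eq k s ans w hI]
    have h2 := inv_stepB k s ans w hI
    have : stepB k (ans, w) s = ((stepB k (ans, w) s).1, (stepB k (ans, w) s).2) := rfl
    rw [this]
    exact ih _ _ h2

-- ===== VERDICT (by name: the statement is the Claim_ definition above) =====
theorem solution_spec : Claim_equal_solution := by
  intro k score _ _
  unfold Spec_solution solution solution_alt
  rw [PySem.List.foldl_pyRange_zero_pyGetD' score 0 (stepA k) ([], [])]
  rw [foldl_eq k score [] [] ⟨List.Pairwise.nil, by intro h; simp; omega, fun _ => rfl⟩]
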